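-- pv_equiv track=rewrite | github.com/bartlomiejduda/ReverseBox | reversebox/image/swizzling/swizzle_psvita_dreamcast.py | get_morton_index_psvita_dreamcast
-- ===== SOURCE A (Python) =====
-- def bsr(x: int) -> int:
--     """bit scan reverse"""
--     if x == 0:
--         raise ValueError("bsr is undefined for 0")
--     return x.bit_length() - 1
--
-- def get_morton_index_psvita_dreamcast(x: int, y: int, width: int, height: int) -> int:
--     logW = bsr(width)
--     logH = bsr(height)
--     d = min(logW, logH)
--     index = 0
--
--     for i in range(d):
--         index |= ((x & (1 << i)) << (i + 1)) | ((y & (1 << i)) << i)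
--
--     if width < height:
--         index |= ((y & ~(width - 1)) << d)
--     else:
--         index |= ((x & ~(height - 1)) << d)
--
--     return index
-- ===== SOURCE B (Python) =====
-- def _interleave2(x, y, d):
--     """Morton-interleave the low d bits: bit i of y goes to position 2i, bit i of x to 2i+1."""
--     if d <= 0:
--         return 0
--     return (y & 1) | ((x & 1) << 1) | (_interleave2(x >> 1, y >> 1, d - 1) << 2)
--
-- def get_morton_index_psvita_dreamcast(x, y, width, height):
--     d = min(width.bit_length(), height.bit_length()) - 1
--     index = _interleave2(x, y, d)
--     if width < height:
--         index |= (y & ~(width - 1)) << d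
--     else:
--         index |= (x & ~(height - 1)) << d
--     return index
-- ===== Notes on version B (the rewrite author's own statement) =====
-- stated objective: alternative
-- what changed: A's index loop that ORs per-bit masked-and-shifted terms is replaced by a structural recursion that consumes one low bit of x and y per step and rebuilds the interleaved index back out of the shifted-down recursive result.
import Mathlib
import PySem

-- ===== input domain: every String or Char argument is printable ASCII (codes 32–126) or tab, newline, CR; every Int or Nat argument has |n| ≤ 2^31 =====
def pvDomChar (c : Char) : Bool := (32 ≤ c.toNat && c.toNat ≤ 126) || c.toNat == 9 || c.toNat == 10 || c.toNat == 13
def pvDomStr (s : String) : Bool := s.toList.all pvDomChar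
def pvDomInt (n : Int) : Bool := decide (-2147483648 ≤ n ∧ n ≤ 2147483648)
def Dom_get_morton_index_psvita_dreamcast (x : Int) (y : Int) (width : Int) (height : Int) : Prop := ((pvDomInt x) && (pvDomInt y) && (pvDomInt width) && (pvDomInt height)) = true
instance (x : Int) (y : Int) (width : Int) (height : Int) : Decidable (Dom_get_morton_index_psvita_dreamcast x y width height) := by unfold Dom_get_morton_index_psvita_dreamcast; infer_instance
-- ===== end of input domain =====

-- B replaces A's per-bit masking loop by a structural recursion that consumes one low bit
-- of x and y per step (alternative decomposition, same cost).

-- ===== PORT A =====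
-- bsr(x): A raises ValueError at x = 0; that input is excluded by Pre_ below.
def pvBsr (v : Int) : Int := (PySem.Int.bitLength v : Int) - 1

def get_morton_index_psvita_dreamcast (x : Int) (y : Int) (width : Int) (height : Int) : Int :=
  let logW := pvBsr width
  let logH := pvBsr height
  let d := min logW logH
  let index := (PySem.List.pyRange 0 d 1).foldl
    (fun index i =>
      PySem.Int.bor index
        (PySem.Int.bor ((PySem.Int.band x ((1 : Int) <<< i.toNat)) <<< (i + 1).toNat)
                       ((PySem.Int.band y ((1 : Int) <<< i.toNat)) <<< i.toNat))) 0
  if width < height then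
    PySem.Int.bor index ((PySem.Int.band y (Int.not (width - 1))) <<< d.toNat)
  else
    PySem.Int.bor index ((PySem.Int.band x (Int.not (height - 1))) <<< d.toNat)

-- ===== PORT B =====
-- _interleave2: Morton-interleave the low d bits (bit i of y → 2i, bit i of x → 2i+1)
def pvInterleave2 (x : Int) (y : Int) (d : Int) : Int :=
  if d ≤ 0 then 0
  else
    PySem.Int.bor
      (PySem.Int.bor (PySem.Int.band y 1) ((PySem.Int.band x 1) <<< (1 : Nat)))
      ((pvInterleave2 (x >>> (1 : Nat)) (y >>> (1 : Nat)) (d - 1)) <<< (2 : Nat))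
termination_by d.toNat
decreasing_by omega

def get_morton_index_psvita_dreamcast_alt (x : Int) (y : Int) (width : Int) (height : Int) : Int :=
  let d := min (PySem.Int.bitLength width : Int) (PySem.Int.bitLength height : Int) - 1
  let index := pvInterleave2 x y d
  if width < height then
    PySem.Int.bor index ((PySem.Int.band y (Int.not (width - 1))) <<< d.toNat)
  else
    PySem.Int.bor index ((PySem.Int.band x (Int.not (height - 1))) <<< d.toNat)

-- ===== PRECONDITION & SPEC =====
-- A's bsr raises ValueError when width = 0 or height = 0 (and B raises there too); Pre_ excludes exactly those.
def Pre_get_morton_index_psvita_dreamcast (x : Int) (y : Int) (width : Int) (height : Int) : Prop :=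
  width ≠ 0 ∧ height ≠ 0
instance (x : Int) (y : Int) (width : Int) (height : Int) : Decidable (Pre_get_morton_index_psvita_dreamcast x y width height) := by unfold Pre_get_morton_index_psvita_dreamcast; infer_instance

def pvWitness_get_morton_index_psvita_dreamcast : Int × Int × Int × Int := (5, 3, 8, 4)

def Spec_get_morton_index_psvita_dreamcast (x : Int) (y : Int) (width : Int) (height : Int) (out : Int) : Prop := out = get_morton_index_psvita_dreamcast_alt x y width height
instance (x : Int) (y : Int) (width : Int) (height : Int) (out : Int) : Decidable (Spec_get_morton_index_psvita_dreamcast x y width height out) := by unfold Spec_get_morton_index_psvita_dreamcast; infer_instance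

-- ===== CLAIM (what is proved, stated in full; the proofs are below) =====
def Claim_equal_get_morton_index_psvita_dreamcast : Prop := ∀ (x : Int) (y : Int) (width : Int) (height : Int), Dom_get_morton_index_psvita_dreamcast x y width height → Pre_get_morton_index_psvita_dreamcast x y width height → Spec_get_morton_index_psvita_dreamcast x y width height (get_morton_index_psvita_dreamcast x y width height)

-- ===== LEMMAS AND PROOFS =====

-- the i-th term OR'ed into A's accumulator
def pvTerm (x y : Int) (i : Nat) : Int :=
  PySem.Int.bor ((PySem.Int.band x ((1 : Int) <<< i)) <<< (i + 1)) ((PySem.Int.band y ((1 : Int) <<< i)) <<< i)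

-- A's loop, folded over Nat indices
def pvLoop (x y : Int) (n : Nat) : Int :=
  (List.range n).foldl (fun acc i => PySem.Int.bor acc (pvTerm x y i)) 0

lemma pv_shift_nonneg {a : Int} (k : Nat) (h : 0 ≤ a) : 0 ≤ a <<< k := by
  rw [Int.shiftLeft_eq]; positivity

lemma pv_one_shift_nonneg (k : Nat) : 0 ≤ (1 : Int) <<< k :=
  pv_shift_nonneg k (by norm_num)

lemma pv_band_mask_nonneg (x : Int) (k : Nat) : 0 ≤ PySem.Int.band x ((1 : Int) <<< k) := by
  rw [PySem.Int.band_comm]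
  exact PySem.Int.band_nonneg_of_nonneg_left x (pv_one_shift_nonneg k)

lemma pv_bor_nonneg {a b : Int} (ha : 0 ≤ a) (hb : 0 ≤ b) : 0 ≤ PySem.Int.bor a b := by
  rw [PySem.Int.bor_of_nonneg ha hb]; positivity

lemma pv_term_nonneg (x y : Int) (i : Nat) : 0 ≤ pvTerm x y i :=
  pv_bor_nonneg (pv_shift_nonneg _ (pv_band_mask_nonneg x i)) (pv_shift_nonneg _ (pv_band_mask_nonneg y i))

lemma pv_natCast_shiftLeft (p k : Nat) : ((p : Nat) : Int) <<< k = ((p <<< k : Nat) : Int) := by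
  rw [Int.shiftLeft_eq, Nat.shiftLeft_eq]; push_cast; ring

lemma pv_bor_assoc {a b c : Int} (ha : 0 ≤ a) (hb : 0 ≤ b) (hc : 0 ≤ c) :
    PySem.Int.bor (PySem.Int.bor a b) c = PySem.Int.bor a (PySem.Int.bor b c) := by
  obtain ⟨p, rfl⟩ : ∃ p : Nat, a = (p : Int) := ⟨a.toNat, (Int.toNat_of_nonneg ha).symm⟩
  obtain ⟨q, rfl⟩ : ∃ q : Nat, b = (q : Int) := ⟨b.toNat, (Int.toNat_of_nonneg hb).symm⟩
  obtain ⟨r, rfl⟩ : ∃ r : Nat, c = (r : Int) := ⟨c.toNat, (Int.toNat_of_nonneg hc).symm⟩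
  simp only [PySem.Int.bor_natCast, Nat.lor_assoc]

lemma pv_zero_bor (a : Int) : PySem.Int.bor 0 a = a := by
  rw [PySem.Int.bor_comm]; exact PySem.Int.bor_zero a

lemma pv_bor_shift {a b : Int} (k : Nat) (ha : 0 ≤ a) (hb : 0 ≤ b) :
    (PySem.Int.bor a b) <<< k = PySem.Int.bor (a <<< k) (b <<< k) := by
  obtain ⟨p, rfl⟩ : ∃ p : Nat, a = (p : Int) := ⟨a.toNat, (Int.toNat_of_nonneg ha).symm⟩
  obtain ⟨q, rfl⟩ : ∃ q : Nat, b = (q : Int) := ⟨b.toNat, (Int.toNat_of_nonneg hb).symm⟩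
  simp only [PySem.Int.bor_natCast, pv_natCast_shiftLeft]
  rw [Nat.shiftLeft_or_distrib]

-- generic fold lemmas for OR-accumulation of nonnegative terms
lemma pv_loopF_nonneg (f : Nat → Int) (hf : ∀ i, 0 ≤ f i) (l : List Nat) (a : Int) (ha : 0 ≤ a) :
    0 ≤ l.foldl (fun acc i => PySem.Int.bor acc (f i)) a := by
  induction l generalizing a with
  | nil => exact ha
  | cons h t ih => exact ih _ (pv_bor_nonneg ha (hf h))

lemma pv_foldl_bor_pull (f : Nat → Int) (hf : ∀ i, 0 ≤ f i) (l : List Nat) (a : Int) (ha : 0 ≤ a) :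
    l.foldl (fun acc i => PySem.Int.bor acc (f i)) a
      = PySem.Int.bor a (l.foldl (fun acc i => PySem.Int.bor acc (f i)) 0) := by
  induction l generalizing a with
  | nil => simp [PySem.Int.bor_zero]
  | cons h t ih =>
    simp only [List.foldl_cons]
    rw [ih _ (pv_bor_nonneg ha (hf h)), ih _ (pv_bor_nonneg le_rfl (hf h)),
        pv_zero_bor,
        pv_bor_assoc ha (hf h) (pv_loopF_nonneg f hf t 0 le_rfl)]

lemma pv_foldl_bor_shift (g : Nat → Int) (hg : ∀ i, 0 ≤ g i) (l : List Nat) :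
    l.foldl (fun acc i => PySem.Int.bor acc ((g i) <<< (2 : Nat))) 0
      = (l.foldl (fun acc i => PySem.Int.bor acc (g i)) 0) <<< (2 : Nat) := by
  induction l with
  | nil => rfl
  | cons h t ih =>
    simp only [List.foldl_cons]
    rw [pv_foldl_bor_pull (f := fun i => (g i) <<< (2 : Nat))
          (fun i => pv_shift_nonneg 2 (hg i)) t _
          (pv_bor_nonneg le_rfl (pv_shift_nonneg 2 (hg h))),
        pv_foldl_bor_pull (f := g) hg t _ (pv_bor_nonneg le_rfl (hg h)),
        ih, pv_zero_bor, pv_zero_bor,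
        pv_bor_shift 2 (hg h) (pv_loopF_nonneg g hg t 0 le_rfl)]

-- bit k of m, as 0 or 1
lemma pv_testBit_toNat (m k : Nat) : (Nat.testBit m k).toNat = (m >>> k) % 2 := by
  rcases Nat.mod_two_eq_zero_or_one (m >>> k) with h | h <;>
    simp [Nat.testBit, h]

-- the arithmetic meaning of x & (1 << k), valid for every Int x (Python two's complement)
lemma pv_band_two_pow (x : Int) (k : Nat) :
    PySem.Int.band x ((1 : Int) <<< k) = ((x >>> k) % 2) * 2 ^ k := by
  have hpow : (1 : Int) <<< k = ((2 ^ k : Nat) : Int) := by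
    rw [Int.shiftLeft_eq]; push_cast; ring
  cases x with
  | ofNat m =>
    rw [hpow, show (Int.ofNat m) = ((m : Nat) : Int) from rfl, PySem.Int.band_natCast]
    rw [show (((m : Nat) : Int) >>> k) = ((m >>> k : Nat) : Int) from rfl]
    rw [Nat.and_two_pow, pv_testBit_toNat]
    generalize m >>> k = t
    norm_cast
  | negSucc m =>
    have hb : PySem.Int.band (Int.negSucc m) ((2 ^ k : Nat) : Int)
        = ((2 ^ k - (2 ^ k &&& m) : Nat) : Int) := by
      simp [PySem.Int.band, Int.toNat_natCast]
      rw [show ((2 : Int) ^ k).toNat = 2 ^ k from rfl]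
    rw [hpow, hb, Nat.and_comm, Nat.and_two_pow, pv_testBit_toNat]
    rw [show ((Int.negSucc m) >>> k) = Int.negSucc (m >>> k) from rfl]
    generalize m >>> k = t
    have hmod : (Int.negSucc t) % 2 = 1 - ((t % 2 : Nat) : Int) := by omega
    rw [hmod]
    rcases Nat.mod_two_eq_zero_or_one t with h | h <;> simp [h]

-- one halving step of the term
lemma pv_term_step (x y : Int) (i : Nat) :
    pvTerm x y (i + 1) = (pvTerm (x >>> (1 : Nat)) (y >>> (1 : Nat)) i) <<< (2 : Nat) := by
  have hsx : x >>> (i + 1) = (x >>> (1 : Nat)) >>> i := by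
    rw [← Int.shiftRight_add, Nat.add_comm]
  have hx : PySem.Int.band x ((1 : Int) <<< (i + 1))
      = (PySem.Int.band (x >>> (1 : Nat)) ((1 : Int) <<< i)) * 2 := by
    rw [pv_band_two_pow, pv_band_two_pow, hsx, pow_succ]; ring
  have hsy : y >>> (i + 1) = (y >>> (1 : Nat)) >>> i := by
    rw [← Int.shiftRight_add, Nat.add_comm]
  have hy : PySem.Int.band y ((1 : Int) <<< (i + 1))
      = (PySem.Int.band (y >>> (1 : Nat)) ((1 : Int) <<< i)) * 2 := by
    rw [pv_band_two_pow, pv_band_two_pow, hsy, pow_succ]; ring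
  unfold pvTerm
  rw [pv_bor_shift 2 (pv_shift_nonneg _ (pv_band_mask_nonneg _ i)) (pv_shift_nonneg _ (pv_band_mask_nonneg _ i))]
  rw [hx, hy]
  simp only [Int.shiftLeft_eq]
  ring_nf

lemma pv_term_zero (x y : Int) :
    pvTerm x y 0 = PySem.Int.bor (PySem.Int.band y 1) ((PySem.Int.band x 1) <<< (1 : Nat)) := by
  unfold pvTerm
  have h0 : (1 : Int) <<< (0 : Nat) = 1 := rfl
  have hy0 : (PySem.Int.band y 1) <<< (0 : Nat) = PySem.Int.band y 1 := by
    rw [Int.shiftLeft_eq]; ring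
  rw [h0, hy0, PySem.Int.bor_comm]

-- A's loop equals B's recursion
lemma pv_loop_eq_interleave (n : Nat) (x y : Int) :
    pvLoop x y n = pvInterleave2 x y (n : Int) := by
  induction n generalizing x y with
  | zero => simp [pvLoop, pvInterleave2]
  | succ n ih =>
    rw [pvInterleave2, if_neg (by push_cast; omega : ¬(((n + 1 : Nat) : Int) ≤ 0))]
    have h2 : ((n + 1 : Nat) : Int) - 1 = (n : Int) := by push_cast; ring
    rw [h2, ← ih]
    unfold pvLoop
    rw [List.range_succ_eq_map]
    simp only [List.foldl_cons, List.foldl_map]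
    rw [pv_zero_bor,
        pv_foldl_bor_pull (f := fun i => pvTerm x y (i + 1)) (fun i => pv_term_nonneg x y (i + 1))
          (List.range n) _ (pv_term_nonneg x y 0)]
    have hcongr : (List.range n).foldl (fun acc i => PySem.Int.bor acc (pvTerm x y (i + 1))) 0
        = (List.range n).foldl
            (fun acc i => PySem.Int.bor acc ((pvTerm (x >>> (1 : Nat)) (y >>> (1 : Nat)) i) <<< (2 : Nat))) 0 := by
      apply PySem.List.foldl_congr_mem
      intro acc a _
      rw [pv_term_step]
    rw [hcongr,
        pv_foldl_bor_shift (g := fun i => pvTerm (x >>> (1 : Nat)) (y >>> (1 : Nat)) i)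
          (fun i => pv_term_nonneg (x >>> (1 : Nat)) (y >>> (1 : Nat)) i),
        pv_term_zero]

lemma pv_bitLength_pos (v : Int) (hv : v ≠ 0) : 1 ≤ PySem.Int.bitLength v := by
  by_contra h
  have h0 : PySem.Int.bitLength v = 0 := by omega
  have := PySem.Int.lt_two_pow_bitLength v
  rw [h0] at this
  simp at this
  exact hv (by omega)

-- ===== VERDICT (by name: the statement is the Claim_ definition above) =====
theorem get_morton_index_psvita_dreamcast_spec : Claim_equal_get_morton_index_psvita_dreamcast := by
  intro x y width height _ hpre
  obtain ⟨hw, hh⟩ := hpre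
  unfold Spec_get_morton_index_psvita_dreamcast
  unfold get_morton_index_psvita_dreamcast get_morton_index_psvita_dreamcast_alt
  have hbw := pv_bitLength_pos width hw
  have hbh := pv_bitLength_pos height hh
  have hd : min (pvBsr width) (pvBsr height)
      = min (PySem.Int.bitLength width : Int) (PySem.Int.bitLength height : Int) - 1 := by
    unfold pvBsr; omega
  simp only [hd]
  set d : Int := min (PySem.Int.bitLength width : Int) (PySem.Int.bitLength height : Int) - 1 with hdef
  have hd0 : 0 ≤ d := by omega
  have hloop : (PySem.List.pyRange 0 d 1).foldl
      (fun index i =>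
        PySem.Int.bor index
          (PySem.Int.bor ((PySem.Int.band x ((1 : Int) <<< i.toNat)) <<< (i + 1).toNat)
                         ((PySem.Int.band y ((1 : Int) <<< i.toNat)) <<< i.toNat))) 0
      = pvInterleave2 x y d := by
    obtain ⟨n, hn⟩ : ∃ n : Nat, d = (n : Int) := ⟨d.toNat, by omega⟩
    rw [hn, PySem.List.pyRange_zero_nat, List.foldl_map, ← pv_loop_eq_interleave]
    unfold pvLoop
    apply PySem.List.foldl_congr_mem
    intro acc a _
    have h1 : ((a : Int)).toNat = a := Int.toNat_natCast a
    have h2 : ((a : Int) + 1).toNat = a + 1 := by omega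
    rw [h1, h2]
    simp only [Int.shiftLeft_natCast_right]
    unfold pvTerm
    rfl
  rw [hloop]
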